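-- pv_equiv track=rewrite | github.com/raeez/chiral-bar-cobar | compute/lib/cy_modular_k3e_engine.py | jacobi_ring_basis_dimensions
-- ===== SOURCE A (Python) =====
-- from typing import Any, Dict, List, Optional, Tuple
--
-- def jacobi_ring_dimension(k: int, m: int) -> int:
--     r"""Dimension of J_{k,m}^{weak} (weak Jacobi forms of weight k, index m).
--
--     For the ring J_{*,*}^{weak} = C[E_4, E_6, phi_{-2,1}, phi_{0,1}]:
--
--     A weak Jacobi form of weight k and index m can be written as:
--     phi = sum_{j=0}^{m} p_j(E_4, E_6) * phi_{-2,1}^j * phi_{0,1}^{m-j}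
--
--     where p_j is a modular form of weight k + 2j - 0*(m-j) = k + 2j.
--     Wait: phi_{-2,1}^j has weight -2j, phi_{0,1}^{m-j} has weight 0.
--     So p_j has weight k + 2j to get total weight k.
--     p_j in M_{k+2j}(SL(2,Z)): dimension is well-known.
--
--     dim M_w(SL(2,Z)) = floor(w/12) + 1 if w >= 0, w = 0 mod 2, w != 2
--                       = floor(w/12) if w = 2 mod 12
--                       = 0 if w < 0 or w odd
--
--     Actually the precise formula:
--     dim M_w = floor(w/12) if w = 2 mod 12
--             = floor(w/12) + 1 if w >= 0 and w != 2 mod 12 and w even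
--             = 0 if w < 0 or w odd
--
--     For the Jacobi form space:
--     dim J_{k,m}^{weak} = sum_{j=0}^{m} dim M_{k+2j}
--
--     This is the Eichler-Zagier dimension formula for weak Jacobi forms.
--     """
--     total = 0
--     for j in range(m + 1):
--         w = k + 2 * j
--         total += _dim_modular_forms(w)
--     return total
--
-- def _dim_modular_forms(w: int) -> int:
--     """Dimension of M_w(SL(2,Z)) for even w >= 0."""
--     if w < 0 or w % 2 == 1:
--         return 0
--     if w == 0:
--         return 1
--     if w == 2:
--         return 0
--     # For w >= 4 even:
--     # dim M_w = floor(w/12) + 1 if w not= 2 mod 12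
--     #         = floor(w/12) if w = 2 mod 12
--     if w % 12 == 2:
--         return w // 12
--     return w // 12 + 1
--
-- def jacobi_ring_basis_dimensions(max_weight: int = 12, max_index: int = 3) -> Dict[Tuple[int, int], int]:
--     """Dimensions of J_{k,m}^{weak} for k <= max_weight, m <= max_index.
--
--     Returns {(k, m): dim} for even k >= 0 (odd k always gives 0 for level 1).
--     """
--     result = {}
--     for k in range(0, max_weight + 1, 2):
--         for m in range(max_index + 1):
--             d = jacobi_ring_dimension(k, m)
--             if d > 0:
--                 result[(k, m)] = d
--     return result
-- ===== SOURCE B (Python) =====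
-- def _mf_dim(w):
--     # dim M_w(SL(2,Z)); the 0 and 2 special cases are absorbed by the formula
--     if w < 0 or w % 2:
--         return 0
--     return w // 12 + (w % 12 != 2)
--
-- def jacobi_ring_basis_dimensions(max_weight=12, max_index=3):
--     # One running prefix sum per weight: dim J_{k,m} = dim J_{k,m-1} + dim M_{k+2m}
--     result = {}
--     for k in range(0, max_weight + 1, 2):
--         running = 0
--         for m in range(max_index + 1):
--             running += _mf_dim(k + 2 * m)
--             if running > 0:
--                 result[(k, m)] = running
--     return result
-- ===== Notes on version B (the rewrite author's own statement) =====
-- stated objective: faster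
-- what changed: B replaces the per-cell recomputation of jacobi_ring_dimension (an inner sum over j=0..m for every m) by one running prefix sum per weight that adds a single modular-form dimension term per index step, and folds the 0/2 special cases of dim M_w into one arithmetic formula.
import Mathlib
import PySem

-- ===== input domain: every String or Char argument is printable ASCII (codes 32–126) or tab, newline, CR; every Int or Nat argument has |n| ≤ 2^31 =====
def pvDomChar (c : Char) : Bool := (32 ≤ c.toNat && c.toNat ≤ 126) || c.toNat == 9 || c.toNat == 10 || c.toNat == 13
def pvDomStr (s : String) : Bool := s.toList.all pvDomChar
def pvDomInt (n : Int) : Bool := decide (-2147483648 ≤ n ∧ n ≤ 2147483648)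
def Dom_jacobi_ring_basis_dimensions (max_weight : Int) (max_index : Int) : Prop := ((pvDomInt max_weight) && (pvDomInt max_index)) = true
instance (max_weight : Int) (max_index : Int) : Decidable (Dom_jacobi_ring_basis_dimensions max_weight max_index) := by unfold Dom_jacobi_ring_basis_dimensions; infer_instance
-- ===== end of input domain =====

-- B computes each dimension by a running prefix sum per weight (O(K*M) instead of A's O(K*M^2)).
-- The Python dicts have pairwise-distinct keys (k,m), so the dict is ported as a list built by
-- appending each freshly inserted (k, m, d) triple — exact for insertion-ordered dicts with fresh keys.

-- ===== PORT A =====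
def dimModularForms (w : Int) : Int :=
  if w < 0 ∨ PySem.Int.mod w 2 = 1 then 0
  else if w = 0 then 1
  else if w = 2 then 0
  else if PySem.Int.mod w 12 = 2 then PySem.Int.floordiv w 12
  else PySem.Int.floordiv w 12 + 1

def jacobi_ring_dimension (k : Int) (m : Int) : Int :=
  (PySem.List.pyRange 0 (m + 1) 1).foldl (fun total j => total + dimModularForms (k + 2 * j)) 0

def jacobi_ring_basis_dimensions (max_weight : Int) (max_index : Int) : List (Int × Int × Int) :=
  (PySem.List.pyRange 0 (max_weight + 1) 2).foldl (fun result k =>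
    (PySem.List.pyRange 0 (max_index + 1) 1).foldl (fun result m =>
      let d := jacobi_ring_dimension k m
      if d > 0 then result ++ [(k, m, d)] else result) result) []

-- ===== PORT B =====
def mfDim (w : Int) : Int :=
  if w < 0 ∨ PySem.Int.mod w 2 ≠ 0 then 0
  else PySem.Int.floordiv w 12 + (if PySem.Int.mod w 12 ≠ 2 then 1 else 0)

def jacobi_ring_basis_dimensions_alt (max_weight : Int) (max_index : Int) : List (Int × Int × Int) :=
  (PySem.List.pyRange 0 (max_weight + 1) 2).foldl (fun result k =>
    ((PySem.List.pyRange 0 (max_index + 1) 1).foldl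
      (fun (st : List (Int × Int × Int) × Int) m =>
        let running := st.2 + mfDim (k + 2 * m)
        (if running > 0 then st.1 ++ [(k, m, running)] else st.1, running))
      (result, 0)).1) []

-- ===== PRECONDITION & SPEC =====
def Spec_jacobi_ring_basis_dimensions (max_weight : Int) (max_index : Int) (out : List (Int × Int × Int)) : Prop := out = jacobi_ring_basis_dimensions_alt max_weight max_index
instance (max_weight : Int) (max_index : Int) (out : List (Int × Int × Int)) : Decidable (Spec_jacobi_ring_basis_dimensions max_weight max_index out) := by unfold Spec_jacobi_ring_basis_dimensions; infer_instance

-- ===== CLAIM (what is proved, stated in full; the proofs are below) =====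
def Claim_equal_jacobi_ring_basis_dimensions : Prop := ∀ (max_weight : Int) (max_index : Int), Dom_jacobi_ring_basis_dimensions max_weight max_index → Spec_jacobi_ring_basis_dimensions max_weight max_index (jacobi_ring_basis_dimensions max_weight max_index)

-- ===== LEMMAS AND PROOFS =====

-- The two modular-form dimension formulas agree.
theorem dim_eq (w : Int) : dimModularForms w = mfDim w := by
  unfold dimModularForms mfDim
  by_cases h : 0 ≤ w
  · rw [PySem.Int.mod_eq_emod_of_pos (a := w) (by norm_num : (0:Int) < 2),
        PySem.Int.mod_eq_emod_of_pos (a := w) (by norm_num : (0:Int) < 12),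
        PySem.Int.floordiv_eq_ediv_of_pos (a := w) (by norm_num : (0:Int) < 12)]
    split_ifs <;> omega
  · have h' : w < 0 := by omega
    rw [if_pos (Or.inl h'), if_pos (Or.inl h')]

-- Running prefix sum of mfDim terms.
def prefS (k : Int) : Nat → Int
  | 0 => 0
  | n + 1 => prefS k n + mfDim (k + 2 * n)

theorem jrd_eq_prefS (k : Int) (n : Nat) : jacobi_ring_dimension k (n : Int) = prefS k (n + 1) := by
  induction n with
  | zero =>
    unfold jacobi_ring_dimension
    have h0 : PySem.List.pyRange 0 1 1 = [0] := by
      simpa using PySem.List.pyRange_one_singleton 0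
    push_cast
    rw [h0]
    simp [prefS, dim_eq]
  | succ n ih =>
    unfold jacobi_ring_dimension at *
    push_cast
    rw [PySem.List.pyRange_one_succ_right (a := 0) (b := (n : Int) + 1) (by positivity),
        List.foldl_append]
    simp only [List.foldl]
    rw [ih, dim_eq]
    simp only [prefS]
    push_cast
    ring

-- The inner loop invariant: B's (list, running) pair after m steps equals
-- (A's list after m steps, prefS k m).
theorem inner_eq (k : Int) (n : Nat) : ∀ (acc : List (Int × Int × Int)),
    (PySem.List.pyRange 0 (n : Int) 1).foldl
      (fun (st : List (Int × Int × Int) × Int) m =>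
        let running := st.2 + mfDim (k + 2 * m)
        (if running > 0 then st.1 ++ [(k, m, running)] else st.1, running))
      (acc, 0)
    = ((PySem.List.pyRange 0 (n : Int) 1).foldl
        (fun result m =>
          let d := jacobi_ring_dimension k m
          if d > 0 then result ++ [(k, m, d)] else result) acc,
       prefS k n) := by
  induction n with
  | zero => intro acc; simp [PySem.List.pyRange_one_eq_nil, prefS]
  | succ n ih =>
    intro acc
    push_cast
    rw [PySem.List.pyRange_one_succ_right (a := 0) (b := (n : Int)) (by positivity),
        List.foldl_append, List.foldl_append, ih acc]
    simp only [List.foldl]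
    have hd : jacobi_ring_dimension k (n : Int) = prefS k n + mfDim (k + 2 * (n : Int)) := by
      rw [jrd_eq_prefS]; simp [prefS]
    simp [hd, prefS]

-- Lift to an arbitrary Int upper bound (handles negative max_index).
theorem inner_eq_int (k : Int) (b : Int) (acc : List (Int × Int × Int)) :
    ((PySem.List.pyRange 0 b 1).foldl
      (fun (st : List (Int × Int × Int) × Int) m =>
        let running := st.2 + mfDim (k + 2 * m)
        (if running > 0 then st.1 ++ [(k, m, running)] else st.1, running))
      (acc, 0)).1
    = (PySem.List.pyRange 0 b 1).foldl
        (fun result m =>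
          let d := jacobi_ring_dimension k m
          if d > 0 then result ++ [(k, m, d)] else result) acc := by
  rcases le_or_gt b 0 with h | h
  · rw [PySem.List.pyRange_one_eq_nil h]; rfl
  · have : b = (b.toNat : Int) := by omega
    rw [this, inner_eq]

theorem jacobi_ring_basis_dimensions_spec : Claim_equal_jacobi_ring_basis_dimensions := by
  intro max_weight max_index _
  unfold Spec_jacobi_ring_basis_dimensions jacobi_ring_basis_dimensions jacobi_ring_basis_dimensions_alt
  induction PySem.List.pyRange 0 (max_weight + 1) 2 using List.reverseRecOn with
  | nil => rfl
  | append_singleton ks k ih =>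
    rw [List.foldl_append, List.foldl_append, ← ih]
    simp only [List.foldl]
    exact (inner_eq_int k (max_index + 1) _).symm
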